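-- pv_equiv track=rewrite | github.com/samarth1107/Transformation-2D | transformation.py | Tranlate
-- ===== SOURCE A (Python) =====
-- def Tranlate(cordinate_T,Dx,Dy):
--     #tranlational matrix
--     transform_matrix=[[1,0,Dx],
--                     [0,1,Dy],
--                     [0,0,0]]
--     #cordinate matix
--     cordinate_T=[cordinate_T[0],
--                 cordinate_T[1],
--                 [1,1,1,1]]
--     #to store result matix multiplication
--     result=[[0,0,0,0],[0,0,0,0]]
--     #matrix multiplication
--     for i in range(0,2):
--         for j in range(0,4):
--             for k in range(0,3):
--                 result[i][j]+=round(transform_matrix[i][k]*cordinate_T[k][j],2)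
--     return result
-- ===== SOURCE B (Python) =====
-- def Tranlate(cordinate_T, Dx, Dy):
--     # closed-form translation: add (Dx, Dy) to each of the 4 fixed columns
--     return [[cordinate_T[0][j] + Dx for j in range(4)],
--             [cordinate_T[1][j] + Dy for j in range(4)]]
-- ===== Notes on version B (the rewrite author's own statement) =====
-- stated objective: simpler
-- what changed: Replaced the 3x3 translation-matrix construction and triple matrix-multiplication loop with a closed-form per-column addition of Dx/Dy (rounding dropped: all values are ints, where round is the identity).
import Mathlib
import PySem

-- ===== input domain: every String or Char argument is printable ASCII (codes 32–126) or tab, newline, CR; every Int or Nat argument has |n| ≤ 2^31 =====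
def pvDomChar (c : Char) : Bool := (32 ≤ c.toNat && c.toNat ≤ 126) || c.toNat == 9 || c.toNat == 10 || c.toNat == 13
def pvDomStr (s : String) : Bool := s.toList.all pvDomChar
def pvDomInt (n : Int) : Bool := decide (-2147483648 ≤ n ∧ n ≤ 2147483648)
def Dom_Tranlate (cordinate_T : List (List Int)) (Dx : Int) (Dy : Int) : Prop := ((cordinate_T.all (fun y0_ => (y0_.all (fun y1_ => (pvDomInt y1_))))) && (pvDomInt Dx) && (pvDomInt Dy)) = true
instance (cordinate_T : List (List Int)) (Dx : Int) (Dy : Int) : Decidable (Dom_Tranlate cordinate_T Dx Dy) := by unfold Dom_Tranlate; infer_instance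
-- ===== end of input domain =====

-- B replaces A's translation-matrix construction and triple matrix-multiplication
-- loop by the closed-form per-column addition of Dx/Dy (simpler; all values are
-- Int, so Python's round(·,2) is the identity and is dropped).

-- ===== PORT A =====
-- Literal port of A: build the transform and coordinate matrices, then the
-- triple loop 'result[i][j] += transform_matrix[i][k]*cordinate_T[k][j]'
-- (each result cell is its own k-fold; round(·,2) on Int is the identity).
-- Out-of-range indexing (Python IndexError) is excluded by Pre_Tranlate;
-- inside Pre_ every getD hits a real element.
def Tranlate (cordinate_T : List (List Int)) (Dx : Int) (Dy : Int) : List (List Int) :=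
  let transform_matrix : List (List Int) := [[1, 0, Dx], [0, 1, Dy], [0, 0, 0]]
  let cordinate_T' : List (List Int) :=
    [cordinate_T.getD 0 [], cordinate_T.getD 1 [], [1, 1, 1, 1]]
  (List.range 2).map (fun i =>
    (List.range 4).map (fun j =>
      (List.range 3).foldl (fun acc k =>
        acc + (transform_matrix.getD i []).getD k 0 * (cordinate_T'.getD k []).getD j 0) 0))

-- ===== PORT B =====
def Tranlate_alt (cordinate_T : List (List Int)) (Dx : Int) (Dy : Int) : List (List Int) :=
  [(List.range 4).map (fun j => (cordinate_T.getD 0 []).getD j 0 + Dx),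
   (List.range 4).map (fun j => (cordinate_T.getD 1 []).getD j 0 + Dy)]

-- ===== PRECONDITION & SPEC =====
-- Pre_ excludes exactly the inputs on which Python A raises IndexError:
-- fewer than 2 rows, or row 0 / row 1 shorter than 4 (B raises there too).
def Pre_Tranlate (cordinate_T : List (List Int)) (Dx : Int) (Dy : Int) : Prop :=
  2 ≤ cordinate_T.length ∧ 4 ≤ (cordinate_T.getD 0 []).length ∧ 4 ≤ (cordinate_T.getD 1 []).length
instance (cordinate_T : List (List Int)) (Dx : Int) (Dy : Int) : Decidable (Pre_Tranlate cordinate_T Dx Dy) := by unfold Pre_Tranlate; infer_instance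

def pvWitness_Tranlate : List (List Int) × Int × Int := ([[1, 2, 3, 4], [5, 6, 7, 8]], 3, -2)

def Spec_Tranlate (cordinate_T : List (List Int)) (Dx : Int) (Dy : Int) (out : List (List Int)) : Prop := out = Tranlate_alt cordinate_T Dx Dy
instance (cordinate_T : List (List Int)) (Dx : Int) (Dy : Int) (out : List (List Int)) : Decidable (Spec_Tranlate cordinate_T Dx Dy out) := by unfold Spec_Tranlate; infer_instance

-- ===== CLAIM (what is proved, stated in full; the proofs are below) =====
def Claim_equal_Tranlate : Prop := ∀ (cordinate_T : List (List Int)) (Dx : Int) (Dy : Int), Dom_Tranlate cordinate_T Dx Dy → Pre_Tranlate cordinate_T Dx Dy → Spec_Tranlate cordinate_T Dx Dy (Tranlate cordinate_T Dx Dy)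

-- ===== LEMMAS AND PROOFS =====

-- ===== VERDICT (by name: the statement is the Claim_ definition above) =====
theorem Tranlate_spec : Claim_equal_Tranlate := by
  intro c Dx Dy _ _
  unfold Spec_Tranlate Tranlate Tranlate_alt
  simp [List.range_succ]
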